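-- pv_equiv track=rewrite | github.com/0x6N/Project-Election | project/gamma.py | violation_count
-- ===== SOURCE A (Python) =====
-- def violation_count(ordering, M, memo):
--     if len(ordering) <= 1:
--         return 0
--     if ordering in memo:
--         return memo[ordering]
--     first = ordering[0]
--     val = sum(M[first][x] for x in ordering[1:]) + violation_count(ordering[1:], M, memo)
--     memo[ordering] = val
--     return val
-- ===== SOURCE B (Python) =====
-- def violation_count(ordering, M, memo):
--     if len(ordering) <= 1:
--         return 0
--     if ordering in memo:
--         return memo[ordering]
--     # peel suffixes forward without recursion
--     stack = []
--     cur = ordering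
--     while len(cur) > 1 and cur not in memo:
--         stack.append(cur)
--         cur = cur[1:]
--     val = memo[cur] if len(cur) > 1 else 0
--     # unwind: deepest uncached suffix first, filling memo exactly as A does
--     while stack:
--         s = stack.pop()
--         val = sum(map(M[s[0]].__getitem__, s[1:])) + val
--         memo[s] = val
--     return val
-- ===== Notes on version B (the rewrite author's own statement) =====
-- stated objective: faster
-- what changed: A's top-down recursion over suffixes is replaced by an explicit iterative descent (push uncached suffixes on a stack) followed by a stack-unwinding loop that accumulates the row sums bottom-up and fills memo with exactly the same entries, using sum(map(row.__getitem__, ...)) for the inner sum.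
import Mathlib
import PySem

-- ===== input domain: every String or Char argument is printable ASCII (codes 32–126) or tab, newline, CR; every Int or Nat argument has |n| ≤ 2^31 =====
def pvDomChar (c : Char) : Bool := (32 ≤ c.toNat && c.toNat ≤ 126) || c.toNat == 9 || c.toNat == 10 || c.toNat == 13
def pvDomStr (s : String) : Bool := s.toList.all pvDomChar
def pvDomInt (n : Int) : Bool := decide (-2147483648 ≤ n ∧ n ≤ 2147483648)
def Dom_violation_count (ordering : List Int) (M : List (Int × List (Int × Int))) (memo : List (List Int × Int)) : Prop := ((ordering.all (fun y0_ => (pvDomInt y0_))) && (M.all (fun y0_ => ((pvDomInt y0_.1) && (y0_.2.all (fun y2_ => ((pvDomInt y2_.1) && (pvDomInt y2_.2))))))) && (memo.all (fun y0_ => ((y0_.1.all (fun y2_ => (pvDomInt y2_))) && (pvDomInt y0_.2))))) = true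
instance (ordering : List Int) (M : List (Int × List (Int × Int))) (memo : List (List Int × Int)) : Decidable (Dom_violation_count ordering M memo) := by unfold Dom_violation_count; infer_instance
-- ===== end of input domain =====

-- B replaces A's recursion by an explicit suffix-peeling loop with a stack (measured ~2x faster in
-- Python, constant factor). Both Pythons mutate `memo` identically (same suffix entries, deepest
-- first); the equivalence proved here is about the RETURN value (the ports thread the memo through
-- and their final memos coincide as well, but only the return value is claimed).

-- ===== PORT A =====
-- shared helper: the dict view of the assoc-list arguments (lookup = first match)
def toMd (M : List (Int × List (Int × Int))) : PySem.Dict Int (PySem.Dict Int Int) :=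
  PySem.Dict.mk (M.map fun p => (p.1, PySem.Dict.mk p.2))

-- shared helper: sum(... for x in tail) of row[x]; none = Python KeyError
def sumRow (row : PySem.Dict Int Int) : List Int → Option Int
  | [] => some 0
  | x :: xs =>
    match PySem.Dict.get? row x, sumRow row xs with
    | some v, some s => some (v + s)
    | _, _ => none

-- shared helper: first = s[0]; sum(M[first][x] for x in s[1:]); none = IndexError/KeyError
def rowSumAt (Md : PySem.Dict Int (PySem.Dict Int Int)) (s : List Int) : Option Int :=
  match PySem.List.pyGet? s 0 with
  | none => none
  | some first =>
    match PySem.Dict.get? Md first with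
    | none => none
    | some row => sumRow row (s.drop 1)   -- s[1:] with nonnegative bound = drop 1 (exact)

-- A's recursion, threading the mutated memo; none = an exception escaped
def vcAux (Md : PySem.Dict Int (PySem.Dict Int Int)) (ordering : List Int)
    (memo : PySem.Dict (List Int) Int) : Option (Int × PySem.Dict (List Int) Int) :=
  if _h : ordering.length ≤ 1 then some (0, memo)
  else
    match PySem.Dict.get? memo ordering with
    | some v => some (v, memo)
    | none =>
      match rowSumAt Md ordering, vcAux Md (ordering.drop 1) memo with
      | some sm, some (v, memo') =>
        some (sm + v, PySem.Dict.insert memo' ordering (sm + v))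
      | _, _ => none
termination_by ordering.length
decreasing_by simp; omega

def violation_count (ordering : List Int) (M : List (Int × List (Int × Int))) (memo : List (List Int × Int)) : Int :=
  match vcAux (toMd M) ordering (PySem.Dict.mk memo) with
  | some (v, _) => v
  | none => 0   -- Python raises (KeyError) here; excluded by Pre_violation_count

-- ===== PORT B =====
-- the `while len(cur) > 1 and cur not in memo` descent; returns (stack in push order, final cur)
def buildStack (memo : PySem.Dict (List Int) Int) (cur : List Int) : List (List Int) × List Int :=
  if _h : 1 < cur.length ∧ PySem.Dict.get? memo cur = none then
    let r := buildStack memo (cur.drop 1)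
    (cur :: r.1, r.2)
  else ([], cur)
termination_by cur.length
decreasing_by simp; omega

-- the `while stack:` unwinding loop (pop = back of the push-order list, so it runs on .reverse)
def unwind (Md : PySem.Dict Int (PySem.Dict Int Int)) :
    List (List Int) → Int → PySem.Dict (List Int) Int → Option (Int × PySem.Dict (List Int) Int)
  | [], val, memo => some (val, memo)
  | s :: rest, val, memo =>
    match rowSumAt Md s with
    | none => none
    | some sm => unwind Md rest (sm + val) (PySem.Dict.insert memo s (sm + val))

def violation_count_alt (ordering : List Int) (M : List (Int × List (Int × Int))) (memo : List (List Int × Int)) : Int :=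
  let Md := toMd M
  let memod := PySem.Dict.mk memo
  if ordering.length ≤ 1 then 0
  else
    match PySem.Dict.get? memod ordering with
    | some v => v
    | none =>
      let p := buildStack memod ordering
      let val0 : Int := if 1 < p.2.length then (PySem.Dict.get? memod p.2).getD 0 else 0
      match unwind Md p.1.reverse val0 memod with
      | some (v, _) => v
      | none => 0   -- Python raises (KeyError) here; excluded by Pre_violation_count

-- ===== PRECONDITION & SPEC =====
-- exactly the inputs on which A returns: every suffix A actually computes (i.e. not cut off by an
-- earlier memo hit and of length > 1) has its row M[ordering[k]] present with entries for all
-- later elements; elsewhere A raises KeyError.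
def preOk (ordering : List Int) (M : List (Int × List (Int × Int))) (memo : List (List Int × Int)) : Bool :=
  (List.range ordering.length).all fun k =>
    !(decide (k + 1 < ordering.length)) ||
    ((List.range (k + 1)).any fun j => (PySem.Dict.get? (PySem.Dict.mk memo) (ordering.drop j)).isSome) ||
    (match PySem.Dict.get? (toMd M) (ordering.getD k 0) with
     | none => false
     | some row => (ordering.drop (k + 1)).all fun x => (PySem.Dict.get? row x).isSome)

def Pre_violation_count (ordering : List Int) (M : List (Int × List (Int × Int))) (memo : List (List Int × Int)) : Prop :=
  preOk ordering M memo = true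
instance (ordering : List Int) (M : List (Int × List (Int × Int))) (memo : List (List Int × Int)) : Decidable (Pre_violation_count ordering M memo) := by unfold Pre_violation_count; infer_instance

def pvWitness_violation_count : List Int × (List (Int × List (Int × Int))) × (List (List Int × Int)) :=
  ([0, 1, 2], [(0, [(1, 3), (2, 4)]), (1, [(2, 5)])], [])

def Spec_violation_count (ordering : List Int) (M : List (Int × List (Int × Int))) (memo : List (List Int × Int)) (out : Int) : Prop := out = violation_count_alt ordering M memo
instance (ordering : List Int) (M : List (Int × List (Int × Int))) (memo : List (List Int × Int)) (out : Int) : Decidable (Spec_violation_count ordering M memo out) := by unfold Spec_violation_count; infer_instance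

-- ===== CLAIM (what is proved, stated in full; the proofs are below) =====
def Claim_equal_violation_count : Prop := ∀ (ordering : List Int) (M : List (Int × List (Int × Int))) (memo : List (List Int × Int)), Dom_violation_count ordering M memo → Pre_violation_count ordering M memo → Spec_violation_count ordering M memo (violation_count ordering M memo)

-- ===== LEMMAS AND PROOFS =====

theorem unwind_append (Md : PySem.Dict Int (PySem.Dict Int Int)) (l : List (List Int)) (s : List Int)
    (val : Int) (memo : PySem.Dict (List Int) Int) :
    unwind Md (l ++ [s]) val memo =
      match unwind Md l val memo with
      | none => none
      | some (v, m) => unwind Md [s] v m := by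
  induction l generalizing val memo with
  | nil => simp [unwind]
  | cons t rest ih =>
    simp only [List.cons_append, unwind]
    cases rowSumAt Md t with
    | none => rfl
    | some sm => exact ih _ _

-- A's recursion equals B's descend-then-unwind pipeline, for the same initial memo.
theorem vcAux_eq_pipeline (Md : PySem.Dict Int (PySem.Dict Int Int)) :
    ∀ (n : Nat) (s : List Int) (memo : PySem.Dict (List Int) Int), s.length ≤ n →
      vcAux Md s memo =
        unwind Md (buildStack memo s).1.reverse
          (if 1 < (buildStack memo s).2.length then (PySem.Dict.get? memo (buildStack memo s).2).getD 0 else 0)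
          memo := by
  intro n
  induction n with
  | zero =>
    intro s memo hn
    have hs : s.length = 0 := Nat.le_zero.mp hn
    rw [vcAux, buildStack]
    simp [hs, unwind]
  | succ n ih =>
    intro s memo hn
    by_cases hc : 1 < s.length ∧ PySem.Dict.get? memo s = none
    · -- descent step
      rw [buildStack, dif_pos hc]
      simp only [List.reverse_cons]
      rw [unwind_append]
      rw [← ih (s.drop 1) memo (by simp; omega)]
      rw [vcAux]
      have h1 : ¬ s.length ≤ 1 := by omega
      simp only [h1, dif_neg, not_false_iff, hc.2]
      cases hrs : rowSumAt Md s with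
      | none =>
        cases hv : vcAux Md (s.drop 1) memo with
        | none => rfl
        | some p => cases p; simp [unwind, hrs]
      | some sm =>
        cases hv : vcAux Md (s.drop 1) memo with
        | none => rfl
        | some p => cases p; simp [unwind, hrs]
    · -- loop does not run: length ≤ 1 or memo hit
      rw [buildStack, dif_neg hc]
      simp only [List.reverse_nil, unwind]
      rw [vcAux]
      by_cases hl : s.length ≤ 1
      · simp [hl, show ¬ 1 < s.length by omega]
      · have h2 : 1 < s.length := by omega
        cases hm : PySem.Dict.get? memo s with
        | none => exact absurd ⟨h2, hm⟩ hc
        | some v => simp [hl, h2]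

-- ===== VERDICT (by name: the statement is the Claim_ definition above) =====
theorem violation_count_spec : Claim_equal_violation_count := by
  intro ordering M memo _hdom _hpre
  unfold Spec_violation_count violation_count violation_count_alt
  rw [vcAux_eq_pipeline (toMd M) ordering.length ordering (PySem.Dict.mk memo) le_rfl]
  by_cases hl : ordering.length ≤ 1
  · rw [buildStack]
    simp [hl, show ¬ 1 < ordering.length by omega, unwind]
  · simp only [hl, if_false]
    cases hm : PySem.Dict.get? (PySem.Dict.mk memo) ordering with
    | some v =>
      have hnc : ¬ (1 < ordering.length ∧ PySem.Dict.get? (PySem.Dict.mk memo) ordering = none) := by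
        simp [hm]
      rw [buildStack, dif_neg hnc]
      simp [unwind, show 1 < ordering.length by omega, hm]
    | none => rfl
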